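-- pv_equiv track=rewrite | github.com/dunn0052/TACSCI1913 | lab2_to_grade/kanot002_lab2.py | splitDigits
-- ===== SOURCE A (Python) =====
-- def splitDigits(digs):
--     def explode(str):
--         a = []
--         for x in str:
--             a += [x]
--         return a
--
--     def verify(charList):
--         acceptableChars = [',', ' ', '0', '1', '2', '3', '4', '5', '6', '7', '8', '9']
--         if not charList:
--             raise RuntimeError
--         oneDigit = False
--         for x in charList:
--             if x not in acceptableChars:
--                 raise RuntimeError
--             elif x in acceptableChars[2:]:
--                 oneDigit = True
--         if not oneDigit:
--             raise RuntimeError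
--         return charList
--
--
--     def strsToInts(strs):
--         b=[]
--         for x in strs:
--             if x == '':
--                 b += [0]
--             elif x != ',' and x != ' ':
--                 b+= [int(x)]
--         return b
--
--     return strsToInts(verify(explode(digs)))
-- ===== SOURCE B (Python) =====
-- DIGITS = frozenset('0123456789')
--
-- def splitDigits(digs):
--     if not digs:
--         raise RuntimeError
--     result = []
--     saw_digit = False
--     for ch in digs:
--         if ch in DIGITS:
--             result.append(int(ch))
--             saw_digit = True
--         elif ch != ',' and ch != ' ':
--             raise RuntimeError
--     if not saw_digit:
--         raise RuntimeError
--     return result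
-- ===== Notes on version B (the rewrite author's own statement) =====
-- stated objective: simpler
-- what changed: Replaces the three composed helpers (explode into 1-char strings, a separate validation pass, then a string-to-int pass) with one single pass over the characters that validates, converts and tracks a saw_digit flag at once.
import Mathlib
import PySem

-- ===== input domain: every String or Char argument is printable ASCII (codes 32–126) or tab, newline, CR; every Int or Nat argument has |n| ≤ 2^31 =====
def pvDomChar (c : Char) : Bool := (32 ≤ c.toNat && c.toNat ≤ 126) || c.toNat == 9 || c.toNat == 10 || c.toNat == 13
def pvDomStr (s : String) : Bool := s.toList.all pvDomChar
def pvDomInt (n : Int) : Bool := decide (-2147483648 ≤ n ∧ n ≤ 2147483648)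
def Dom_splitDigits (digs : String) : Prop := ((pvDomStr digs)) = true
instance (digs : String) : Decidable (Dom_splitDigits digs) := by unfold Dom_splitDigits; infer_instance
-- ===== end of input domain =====

-- B folds the validation/conversion passes of A into one single pass; proved equal on Pre_
-- (the inputs where A returns normally). The RuntimeError cases of A (and of B, which raises
-- on exactly the same inputs) lie outside Pre_.

-- ===== PORT A =====
-- explode: a = []; for x in str: a += [x]    (elements are 1-character strings)
def pvExplode (s : String) : List String :=
  s.toList.foldl (fun a x => a ++ [String.singleton x]) []

-- verify: validation only raises or returns charList unchanged; the raise conditions are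
-- exactly Pre_splitDigits below, so on Pre_ the returned value is charList itself.
def pvVerify (charList : List String) : List String := charList

-- strsToInts: b=[]; for x: if x=='': b+=[0] elif x!=',' and x!=' ': b+=[int(x)]
-- int(x) ported as (PySem.Int.ofStr? x).getD 0; the .getD 0 default is reached only on
-- inputs excluded by Pre_ (verify would have raised before int(x) could raise).
def pvStrsToInts (strs : List String) : List Int :=
  strs.foldl (fun b x =>
    if x = "" then b ++ [(0 : Int)]
    else if x ≠ "," ∧ x ≠ " " then b ++ [(PySem.Int.ofStr? x).getD 0]
    else b) []

def splitDigits (digs : String) : List Int :=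
  pvStrsToInts (pvVerify (pvExplode digs))

-- ===== PORT B =====
-- single pass: (result, saw_digit) accumulator; raise branches are outside Pre_.
def pvDigits : List Char := ['0','1','2','3','4','5','6','7','8','9']

def splitDigits_alt (digs : String) : List Int :=
  (digs.toList.foldl (fun (st : List Int × Bool) ch =>
      if pvDigits.contains ch then
        (st.1 ++ [(PySem.Int.ofStr? (String.singleton ch)).getD 0], true)
      else st)   -- ch = ',' or ' ' skips; any other ch raises (outside Pre_)
    ([], false)).1

-- ===== PRECONDITION & SPEC =====
-- Pre_ excludes exactly the inputs where A raises RuntimeError: the empty string, a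
-- character other than comma, space or a decimal digit, or no digit at all.
def Pre_splitDigits (digs : String) : Prop :=
  digs.toList ≠ [] ∧
  digs.toList.all (fun c => ([',', ' '] ++ pvDigits).contains c) = true ∧
  digs.toList.any (fun c => pvDigits.contains c) = true

instance (digs : String) : Decidable (Pre_splitDigits digs) := by
  unfold Pre_splitDigits; infer_instance

def pvWitness_splitDigits : String := "1, 23"

def Spec_splitDigits (digs : String) (out : List Int) : Prop := out = splitDigits_alt digs
instance (digs : String) (out : List Int) : Decidable (Spec_splitDigits digs out) := by unfold Spec_splitDigits; infer_instance

-- ===== CLAIM (what is proved, stated in full; the proofs are below) =====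
def Claim_equal_splitDigits : Prop := ∀ (digs : String), Dom_splitDigits digs → Pre_splitDigits digs → Spec_splitDigits digs (splitDigits digs)

-- ===== LEMMAS AND PROOFS =====

theorem pvExplode_eq (s : String) :
    pvExplode s = s.toList.map String.singleton := by
  unfold pvExplode
  suffices h : ∀ (l : List Char) (a : List String),
      l.foldl (fun a x => a ++ [String.singleton x]) a = a ++ l.map String.singleton by
    simpa using h s.toList []
  intro l
  induction l with
  | nil => simp [List.foldl]
  | cons c t ih => intro a; simp [List.foldl, ih]

theorem pv_main (l : List Char) (h : ∀ c ∈ l, c ∈ ([',', ' '] ++ pvDigits))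
    (b : List Int) (saw : Bool) :
    (l.map String.singleton).foldl (fun b x =>
      if x = "" then b ++ [(0 : Int)]
      else if x ≠ "," ∧ x ≠ " " then b ++ [(PySem.Int.ofStr? x).getD 0]
      else b) b
    = (l.foldl (fun (st : List Int × Bool) ch =>
        if pvDigits.contains ch then
          (st.1 ++ [(PySem.Int.ofStr? (String.singleton ch)).getD 0], true)
        else st) (b, saw)).1 := by
  induction l generalizing b saw with
  | nil => simp [List.foldl]
  | cons c t ih =>
    have hc : c ∈ ([',', ' '] ++ pvDigits) := h c (List.mem_cons_self ..)
    have ht : ∀ c ∈ t, c ∈ ([',', ' '] ++ pvDigits) := fun c hm => h c (List.mem_cons_of_mem _ hm)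
    simp only [pvDigits, List.mem_append, List.mem_cons, List.not_mem_nil, or_false] at hc
    rcases hc with (hc | hc) | hc | hc | hc | hc | hc | hc | hc | hc | hc | hc <;>
      subst hc <;>
      simp only [List.map_cons, List.foldl_cons] <;>
      first
        | (rw [if_neg (by decide), if_neg (by decide), if_neg (by decide)]; exact ih ht _ _)
        | (rw [if_neg (by decide), if_pos (by decide), if_pos (by decide)]; exact ih ht _ _)

theorem splitDigits_spec' (digs : String) (h : Pre_splitDigits digs) :
    splitDigits digs = splitDigits_alt digs := by
  unfold splitDigits splitDigits_alt pvVerify pvStrsToInts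
  rw [pvExplode_eq]
  refine pv_main digs.toList (fun c hm => ?_) [] false
  have := List.all_eq_true.mp h.2.1 c hm
  simpa using this

-- ===== VERDICT (by name: the statement is the Claim_ definition above) =====
theorem splitDigits_spec : Claim_equal_splitDigits := by
  intro digs _ hpre
  exact splitDigits_spec' digs hpre
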